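-- pv_equiv track=rewrite | github.com/stranac/Advent-of-Code | day03/day03.py | visited_houses
-- ===== SOURCE A (Python) =====
-- def visited_houses(instructions):
--     """Determine which houses were visited by Santa (or Robo-Santa).
--
--     Args:
--       instructions (string): Santa's movement instructions.
--         Moves one house to the north `^`, south `v`, east `>`, or west `<`.
--
--     Returns:
--       set of tuples: Coordinates of the visited houses.
--
--     Examples:
--       >>> visited_houses('>')
--       {(1, 0), (0, 0)}
--       >>> visited_houses('^>v<')
--       {(0, 1), (1, 0), (0, 0), (1, 1)}
--       >>> visited_houses('^v^v^v^v^v')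
--       {(0, 1), (0, 0)}
--
--     """
--     x = y = 0
--     visited = {(x, y)}
--     for c in instructions:
--         if c == '^':
--             y += 1
--         elif c == 'v':
--             y -= 1
--         elif c == '>':
--             x += 1
--         elif c == '<':
--             x -= 1
--         visited.add((x, y))
--     return visited
-- ===== SOURCE B (Python) =====
-- def visited_houses(instructions):
--     """Divide-and-conquer: the path of a concatenated instruction string is the
--     path of the left half followed by the path of the right half translated by
--     the left half's total displacement.  Recursively split the string in half,
--     combine the relative paths by translation, and collect the set once."""
--     deltas = {'^': (0, 1), 'v': (0, -1), '>': (1, 0), '<': (-1, 0)}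
--
--     def walk(s):
--         # returns (positions after each step, total displacement), relative to (0, 0)
--         if not s:
--             return [], (0, 0)
--         if len(s) == 1:
--             d = deltas.get(s, (0, 0))
--             return [d], d
--         k = len(s) // 2
--         p1, (dx, dy) = walk(s[:k])
--         p2, (ex, ey) = walk(s[k:])
--         return p1 + [(x + dx, y + dy) for x, y in p2], (dx + ex, dy + ey)
--
--     path, _ = walk(instructions)
--     return set([(0, 0)] + path)
-- ===== Notes on version B (the rewrite author's own statement) =====
-- stated objective: alternative
-- what changed: B replaces A's single sequential loop mutating (x,y) with a divide-and-conquer recursion: it splits the instruction string in half, recursively computes each half's relative path and total displacement, merges by translating the right half's path by the left half's displacement, and collects the set once at the end.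
import Mathlib
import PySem

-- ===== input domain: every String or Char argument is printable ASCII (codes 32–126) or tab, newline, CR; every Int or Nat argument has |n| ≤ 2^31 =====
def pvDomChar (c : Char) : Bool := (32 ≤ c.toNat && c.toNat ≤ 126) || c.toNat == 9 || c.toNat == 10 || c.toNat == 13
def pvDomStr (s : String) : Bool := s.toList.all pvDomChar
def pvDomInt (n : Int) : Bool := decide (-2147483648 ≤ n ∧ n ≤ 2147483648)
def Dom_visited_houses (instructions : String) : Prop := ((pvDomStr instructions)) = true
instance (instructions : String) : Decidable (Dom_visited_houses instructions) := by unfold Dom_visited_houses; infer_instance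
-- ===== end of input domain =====

-- B: divide-and-conquer — split the instructions in half, recursively compute each half's relative path and displacement, merge by translation — instead of A's sequential positional loop; alternative decomposition, same result.

-- ===== PORT A =====
def visited_houses (instructions : String) : List (Int × Int) :=
  let st := instructions.toList.foldl
    (fun (st : Int × Int × PySem.Set (Int × Int)) c =>
      let x := st.1
      let y := st.2.1
      let v := st.2.2
      let p : Int × Int :=
        if c = '^' then (x, y + 1)
        else if c = 'v' then (x, y - 1)
        else if c = '>' then (x + 1, y)
        else if c = '<' then (x - 1, y)
        else (x, y)
      (p.1, p.2, PySem.Set.add v (p.1, p.2)))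
    (0, 0, PySem.Set.add PySem.Set.empty ((0 : Int), (0 : Int)))
  st.2.2

-- ===== PORT B =====
-- the deltas dict of Source B (keys are the one-character strings, modelled by their Char)
def pvDeltas : PySem.Dict Char (Int × Int) :=
  PySem.Dict.ofList [('^', ((0 : Int), (1 : Int))), ('v', (0, -1)), ('>', (1, 0)), ('<', (-1, 0))]

-- walk(s): (positions after each step, total displacement), relative to (0,0).
-- Source B's slices s[:k] / s[k:] with 0 ≤ k ≤ len(s) are exactly take k / drop k (exact here).
def pvWalk : List Char → List (Int × Int) × (Int × Int)
  | [] => ([], (0, 0))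
  | [c] =>
      let d := PySem.Dict.getD pvDeltas c (0, 0)
      ([d], d)
  | c₀ :: c₁ :: rest =>
      let l := c₀ :: c₁ :: rest
      let k := l.length / 2
      let r1 := pvWalk (l.take k)
      let r2 := pvWalk (l.drop k)
      (r1.1 ++ r2.1.map (fun p => (p.1 + r1.2.1, p.2 + r1.2.2)),
       (r1.2.1 + r2.2.1, r1.2.2 + r2.2.2))
  termination_by l => l.length
  decreasing_by
    · simp only [List.length_take]; simp [List.length_cons]; omega
    · simp only [List.length_drop]; simp [List.length_cons]; omega

def visited_houses_alt (instructions : String) : List (Int × Int) :=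
  PySem.Set.ofList (((0 : Int), (0 : Int)) :: (pvWalk instructions.toList).1)

-- ===== PRECONDITION & SPEC =====
def Spec_visited_houses (instructions : String) (out : List (Int × Int)) : Prop := out = visited_houses_alt instructions
instance (instructions : String) (out : List (Int × Int)) : Decidable (Spec_visited_houses instructions out) := by unfold Spec_visited_houses; infer_instance

-- ===== CLAIM (what is proved, stated in full; the proofs are below) =====
def Claim_equal_visited_houses : Prop := ∀ (instructions : String), Dom_visited_houses instructions → Spec_visited_houses instructions (visited_houses instructions)

-- ===== LEMMAS AND PROOFS =====

-- per-character deltas, shared characterisation of both programs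
def pvDx (c : Char) : Int := (if c = '>' then 1 else 0) - (if c = '<' then 1 else 0)
def pvDy (c : Char) : Int := (if c = '^' then 1 else 0) - (if c = 'v' then 1 else 0)

-- the positions reached AFTER each step, starting from (x, y)
def pvPath : List Char → Int → Int → List (Int × Int)
  | [], _, _ => []
  | c :: cs, x, y => (x + pvDx c, y + pvDy c) :: pvPath cs (x + pvDx c) (y + pvDy c)

lemma pvStepEq (c : Char) (x y : Int) :
    (if c = '^' then (x, y + 1)
     else if c = 'v' then (x, y - 1)
     else if c = '>' then (x + 1, y)
     else if c = '<' then (x - 1, y)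
     else (x, y)) = (x + pvDx c, y + pvDy c) := by
  unfold pvDx pvDy
  split_ifs with h1 h2 h3 h4 <;> simp_all <;> omega

lemma pvStepFunEq :
    (fun (st : Int × Int × PySem.Set (Int × Int)) (c : Char) =>
      let x := st.1
      let y := st.2.1
      let v := st.2.2
      let p : Int × Int :=
        if c = '^' then (x, y + 1)
        else if c = 'v' then (x, y - 1)
        else if c = '>' then (x + 1, y)
        else if c = '<' then (x - 1, y)
        else (x, y)
      (p.1, p.2, PySem.Set.add v (p.1, p.2)))
    = (fun (st : Int × Int × PySem.Set (Int × Int)) (c : Char) =>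
        (st.1 + pvDx c, st.2.1 + pvDy c,
         PySem.Set.add st.2.2 (st.1 + pvDx c, st.2.1 + pvDy c))) := by
  funext st c
  simp only [pvStepEq]

lemma loopA (cs : List Char) (x y : Int) (s : PySem.Set (Int × Int)) :
    (cs.foldl
      (fun (st : Int × Int × PySem.Set (Int × Int)) (c : Char) =>
        (st.1 + pvDx c, st.2.1 + pvDy c,
         PySem.Set.add st.2.2 (st.1 + pvDx c, st.2.1 + pvDy c)))
      (x, y, s)).2.2 = (pvPath cs x y).foldl PySem.Set.add s := by
  induction cs generalizing x y s with
  | nil => rfl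
  | cons c cs ih =>
      simp only [List.foldl, pvPath]
      exact ih _ _ _

-- the deltas-dict lookup with default agrees with the per-character deltas
lemma pvDelta_eq (c : Char) : PySem.Dict.getD pvDeltas c (0, 0) = (pvDx c, pvDy c) := by
  by_cases h1 : c = '^'
  · subst h1; decide
  · by_cases h2 : c = 'v'
    · subst h2; decide
    · by_cases h3 : c = '>'
      · subst h3; decide
      · by_cases h4 : c = '<'
        · subst h4; decide
        · have hit : pvDeltas.items = [('^', ((0:Int),(1:Int))), ('v', (0, -1)), ('>', (1, 0)), ('<', (-1, 0))] := by decide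
          have e1 : ('^' == c) = false := beq_eq_false_iff_ne.mpr (Ne.symm h1)
          have e2 : ('v' == c) = false := beq_eq_false_iff_ne.mpr (Ne.symm h2)
          have e3 : ('>' == c) = false := beq_eq_false_iff_ne.mpr (Ne.symm h3)
          have e4 : ('<' == c) = false := beq_eq_false_iff_ne.mpr (Ne.symm h4)
          simp [PySem.Dict.getD, PySem.Dict.get?, hit, List.find?, e1, e2, e3, e4,
                pvDx, pvDy, h1, h2, h3, h4]

-- paths are translation-invariant
lemma pvPath_shift (cs : List Char) (x y : Int) :
    pvPath cs x y = (pvPath cs 0 0).map (fun p => (p.1 + x, p.2 + y)) := by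
  induction cs generalizing x y with
  | nil => rfl
  | cons c cs ih =>
      simp only [pvPath, List.map]
      rw [ih (x + pvDx c) (y + pvDy c), ih (0 + pvDx c) (0 + pvDy c), List.map_map]
      congr 1
      · simp [Prod.ext_iff]; constructor <;> ring
      · apply List.map_congr_left
        intro p _
        simp [Prod.ext_iff]; constructor <;> ring

-- paths of concatenations: the right part starts at the left part's endpoint
lemma pvPath_append (as bs : List Char) (x y : Int) :
    pvPath (as ++ bs) x y
      = pvPath as x y ++ pvPath bs (x + (as.map pvDx).sum) (y + (as.map pvDy).sum) := by
  induction as generalizing x y with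
  | nil => simp [pvPath]
  | cons c as ih =>
      simp only [List.cons_append, pvPath, List.map, List.sum_cons, ih]
      have h1 : x + pvDx c + (as.map pvDx).sum = x + (pvDx c + (as.map pvDx).sum) := by ring
      have h2 : y + pvDy c + (as.map pvDy).sum = y + (pvDy c + (as.map pvDy).sum) := by ring
      rw [h1, h2]

-- the divide-and-conquer walk computes the path from the origin and the total displacement
lemma pvWalk_spec (cs : List Char) :
    pvWalk cs = (pvPath cs 0 0, ((cs.map pvDx).sum, (cs.map pvDy).sum)) := by
  induction cs using pvWalk.induct with
  | case1 => simp [pvWalk, pvPath]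
  | case2 c => simp [pvWalk, pvDelta_eq, pvPath]
  | case3 c₀ c₁ rest l k ih1 ih2 =>
      simp only [k, l] at ih1 ih2
      rw [pvWalk, ih1, ih2]
      dsimp only
      have htd : (c₀ :: c₁ :: rest).take ((c₀ :: c₁ :: rest).length / 2)
          ++ (c₀ :: c₁ :: rest).drop ((c₀ :: c₁ :: rest).length / 2) = c₀ :: c₁ :: rest :=
        List.take_append_drop _ _
      simp only [Prod.mk.injEq]
      refine ⟨?_, ?_, ?_⟩
      · conv_rhs => rw [← htd]
        rw [pvPath_append, zero_add, zero_add]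
        congr 1
        exact (pvPath_shift _ _ _).symm
      · conv_rhs => rw [← htd]; rw [List.map_append, List.sum_append]
      · conv_rhs => rw [← htd]; rw [List.map_append, List.sum_append]

-- ===== VERDICT (by name: the statement is the Claim_ definition above) =====
theorem visited_houses_spec : Claim_equal_visited_houses := by
  intro instructions _
  show visited_houses instructions = visited_houses_alt instructions
  unfold visited_houses visited_houses_alt
  rw [pvStepFunEq, loopA, pvWalk_spec]
  rw [PySem.Set.ofList_eq_foldl]
  rfl
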